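-- pv_equiv track=rewrite | github.com/sanghyukmoon/fiso | fiso/tools/tools.py | calc_leaf
-- ===== SOURCE A (Python) =====
-- def find_split(iso,eic_dict):
--     # For a given iso and child data eic_dict, find the point where iso splits
--     # eic_dict = dict(zip(iso_list,eic_list))
--     eics = eic_dict[iso]
--     le = len(eics)
--
--     # If only 1 child, recurse
--     if le == 1:
--         return find_split(eics[0],eic_dict)
--     # 0 child leaf node, or multiple children, return self
--     else:
--         return iso
--
-- def calc_leaf(iso_dict,iso_list,eic_list):
--     leaf_dict = {}
--     eic_dict = dict(zip(iso_list,eic_list))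
--
--     # fsd = find-split-dict, for each split list isos that it owns
--     fsd = {}
--     for iso in iso_list:
--         if iso not in iso_dict:
--             continue
--         split = find_split(iso,eic_dict)
--         if split in fsd:
--             fsd[split].append(iso)
--         else:
--             fsd[split] = [split]
--
--
--     for split in fsd:
--         # split is a leaf node
--         if len(eic_dict[split]) == 0:
--             leaf_dict[split] = []
--             # but split also owns nodes above with only 1 child
--             for subiso in fsd[split]:
--                 if subiso in iso_dict:
--                     leaf_dict[split] += iso_dict[subiso]
--     return leaf_dict
-- ===== SOURCE B (Python) =====
-- def calc_leaf(iso_dict, iso_list, eic_list):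
--     eic_dict = dict(zip(iso_list, eic_list))
--     cache = {}  # memoized split per node: each chain is walked once
--     fsd = {}
--     for iso in iso_list:
--         if iso not in iso_dict:
--             continue
--         path = []
--         cur = iso
--         while cur not in cache:
--             eics = eic_dict[cur]
--             if len(eics) == 1:
--                 path.append(cur)
--                 cur = eics[0]
--             else:
--                 cache[cur] = cur
--         s = cache[cur]
--         for p in path:
--             cache[p] = s
--         if s in fsd:
--             fsd[s].append(iso)
--         else:
--             fsd[s] = [s]
--     return {s: [x for m in members if m in iso_dict for x in iso_dict[m]]
--             for s, members in fsd.items() if not eic_dict[s]}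
-- ===== Notes on version B (the rewrite author's own statement) =====
-- stated objective: alternative
-- what changed: B memoizes find_split with a cache dict filled along each walked path, so every single-child chain is traversed once overall instead of being re-walked from each iso (an asymptotic win only on chain-heavy inputs, not measured on the generator's inputs), and builds each leaf's list as one filtered concatenation instead of repeated dict '+=' updates.
import Mathlib
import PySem

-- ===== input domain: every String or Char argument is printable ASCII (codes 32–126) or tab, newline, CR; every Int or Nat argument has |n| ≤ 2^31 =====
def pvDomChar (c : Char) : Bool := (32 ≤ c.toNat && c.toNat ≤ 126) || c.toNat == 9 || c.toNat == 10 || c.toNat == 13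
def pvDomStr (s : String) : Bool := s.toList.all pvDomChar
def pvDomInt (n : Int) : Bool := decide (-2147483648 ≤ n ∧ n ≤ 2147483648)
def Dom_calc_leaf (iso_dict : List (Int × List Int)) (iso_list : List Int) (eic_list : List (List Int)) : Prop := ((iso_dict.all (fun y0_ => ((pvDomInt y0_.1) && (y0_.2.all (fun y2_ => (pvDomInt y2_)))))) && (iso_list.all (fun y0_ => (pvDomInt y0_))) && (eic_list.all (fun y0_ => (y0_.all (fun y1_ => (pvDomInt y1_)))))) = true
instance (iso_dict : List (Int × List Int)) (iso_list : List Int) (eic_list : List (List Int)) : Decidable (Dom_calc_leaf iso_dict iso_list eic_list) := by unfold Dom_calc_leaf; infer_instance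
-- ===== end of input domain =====

-- B memoizes find_split with a cache, so each single-child chain is walked once
-- instead of being re-walked from every iso as in A; each leaf value is built as one
-- filtered concatenation instead of repeated `+=` updates.
-- ===== PORT A =====
-- find_split: follow single-child chains; the Lean port adds fuel (Python recursion has
-- none); `none` = Python KeyError / unbounded recursion, excluded by Pre_.
def findSplit (fuel : Nat) (eic : PySem.Dict Int (List Int)) (iso : Int) : Option Int :=
  match fuel, eic.get? iso with
  | 0, _ => none
  | _, none => none                              -- KeyError in Python
  | f+1, some eics =>
    if eics.length = 1 then
      match PySem.List.pyGet? eics 0 with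
      | some c => findSplit f eic c
      | none => none                             -- unreachable: eics has length 1
    else some iso

def calc_leaf (iso_dict : List (Int × List Int)) (iso_list : List Int) (eic_list : List (List Int)) : List (Int × List Int) :=
  let isoD : PySem.Dict Int (List Int) := PySem.Dict.mk iso_dict
  let eic : PySem.Dict Int (List Int) := PySem.Dict.ofList (iso_list.zip eic_list)
  let F := iso_list.length + 1                   -- fuel: enough for any terminating chain
  let fsd : PySem.Dict Int (List Int) := iso_list.foldl (fun fsd iso =>
    if isoD.contains iso then
      match findSplit F eic iso with
      | some split =>
        if fsd.contains split then fsd.modify split [] (· ++ [iso])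
        else fsd.insert split [split]
      | none => fsd                              -- Python raises here; outside Pre_
    else fsd) PySem.Dict.empty
  (fsd.keys.foldl (fun leaf split =>
    match eic.get? split with
    | some l =>
      if l.length = 0 then
        (fsd.getD split []).foldl (fun leaf subiso =>
          if isoD.contains subiso then leaf.modify split [] (· ++ isoD.getD subiso [])
          else leaf) (leaf.insert split [])
      else leaf
    | none => leaf                               -- unreachable: split is always a key
    ) (PySem.Dict.empty : PySem.Dict Int (List Int))).items

-- ===== PORT B =====
-- the `while cur not in cache` walk of Source B, with fuel; on exit every node of `path`
-- is cached with the split `s` found at the end of the chain.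
def splitWalk (fuel : Nat) (eic : PySem.Dict Int (List Int)) (cache : PySem.Dict Int Int)
    (path : List Int) (cur : Int) : Option (Int × PySem.Dict Int Int) :=
  match fuel with
  | 0 => none
  | f+1 =>
    match cache.get? cur with
    | some s => some (s, path.foldl (fun c p => c.insert p s) cache)
    | none =>
      match eic.get? cur with
      | none => none                             -- KeyError in Python
      | some eics =>
        if eics.length = 1 then
          match PySem.List.pyGet? eics 0 with
          | some c => splitWalk f eic cache (path ++ [cur]) c
          | none => none                         -- unreachable: eics has length 1
        else
          -- cache[cur] = cur; the loop re-checks and exits with s = cur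
          some (cur, path.foldl (fun c p => c.insert p cur) (cache.insert cur cur))

def calc_leaf_alt (iso_dict : List (Int × List Int)) (iso_list : List Int) (eic_list : List (List Int)) : List (Int × List Int) :=
  let isoD : PySem.Dict Int (List Int) := PySem.Dict.mk iso_dict
  let eic : PySem.Dict Int (List Int) := PySem.Dict.ofList (iso_list.zip eic_list)
  let F := iso_list.length + 1
  let st := iso_list.foldl (fun st iso =>
    if isoD.contains iso then
      match splitWalk F eic st.1 [] iso with
      | some sc =>
        (sc.2, if st.2.contains sc.1 then st.2.modify sc.1 [] (· ++ [iso])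
               else st.2.insert sc.1 [sc.1])
      | none => st
    else st) ((PySem.Dict.empty : PySem.Dict Int Int), (PySem.Dict.empty : PySem.Dict Int (List Int)))
  (st.2.items.foldl (fun leaf p =>
    match eic.get? p.1 with
    | some l =>
      if l.length = 0 then
        leaf.insert p.1 ((p.2.filter (fun m => isoD.contains m)).flatMap (fun m => isoD.getD m []))
      else leaf
    | none => leaf
    ) (PySem.Dict.empty : PySem.Dict Int (List Int))).items

-- ===== PRECONDITION & SPEC =====
-- nextNode: the single-child successor map of the input's eic graph (a key with exactly
-- one child steps to that child; every other point — a 0/many-child key or a non-key —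
-- is a fixed point).  isStop: a key with 0 or ≥2 children, i.e. a point where find_split
-- returns.  Both are plain functions of the INPUT dict, not copies of either port.
def nextNode (d : PySem.Dict Int (List Int)) (k : Int) : Int :=
  match d.get? k with
  | some l => if l.length = 1 then l.getD 0 k else k
  | none => k

def isStop (d : PySem.Dict Int (List Int)) (k : Int) : Bool :=
  match d.get? k with
  | some l => l.length != 1
  | none => false

-- Pre_ excludes EXACTLY the inputs on which A raises: from some iso of iso_list that is a
-- key of iso_dict, the single-child chain never reaches a 0/many-child key — it hits a
-- missing eic key (KeyError) or cycles forever (RecursionError).  B raises/diverges on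
-- those inputs too.  On every input where A returns, every chain stops within
-- len(iso_list) steps (chains visit distinct keys of a dict with ≤ len(iso_list) keys),
-- so Pre_ holds.
def Pre_calc_leaf (iso_dict : List (Int × List Int)) (iso_list : List Int) (eic_list : List (List Int)) : Prop :=
  ∀ iso ∈ iso_list, iso ∈ iso_dict.map Prod.fst →
    ∃ n ∈ List.range (iso_list.length + 1),
      isStop (PySem.Dict.ofList (iso_list.zip eic_list))
        ((nextNode (PySem.Dict.ofList (iso_list.zip eic_list)))^[n] iso) = true
instance (iso_dict : List (Int × List Int)) (iso_list : List Int) (eic_list : List (List Int)) : Decidable (Pre_calc_leaf iso_dict iso_list eic_list) := by unfold Pre_calc_leaf; infer_instance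

def pvWitness_calc_leaf : (List (Int × List Int)) × List Int × List (List Int) :=
  ([(1, [10, 11]), (2, [12])], [2, 1], [[1], []])

def Spec_calc_leaf (iso_dict : List (Int × List Int)) (iso_list : List Int) (eic_list : List (List Int)) (out : List (Int × List Int)) : Prop := out = calc_leaf_alt iso_dict iso_list eic_list
instance (iso_dict : List (Int × List Int)) (iso_list : List Int) (eic_list : List (List Int)) (out : List (Int × List Int)) : Decidable (Spec_calc_leaf iso_dict iso_list eic_list out) := by unfold Spec_calc_leaf; infer_instance

-- ===== CLAIM (what is proved, stated in full; the proofs are below) =====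
def Claim_equal_calc_leaf : Prop := ∀ (iso_dict : List (Int × List Int)) (iso_list : List Int) (eic_list : List (List Int)), Dom_calc_leaf iso_dict iso_list eic_list → Pre_calc_leaf iso_dict iso_list eic_list → Spec_calc_leaf iso_dict iso_list eic_list (calc_leaf iso_dict iso_list eic_list)

-- ===== LEMMAS AND PROOFS =====

-- fuel monotonicity of findSplit
theorem findSplit_mono (eic : PySem.Dict Int (List Int)) :
    ∀ (f g : Nat) (k s : Int), f ≤ g → findSplit f eic k = some s → findSplit g eic k = some s := by
  intro f
  induction f with
  | zero => intro g k s _ h; simp [findSplit] at h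
  | succ f ih =>
    intro g k s hle h
    obtain ⟨g', rfl⟩ : ∃ g', g = g' + 1 := ⟨g - 1, by omega⟩
    rcases he : eic.get? k with _ | eics
    · rw [findSplit.eq_def, he] at h; exact absurd h (by simp)
    · rw [findSplit.eq_def, he] at h
      rw [findSplit.eq_def, he]
      dsimp only at h ⊢
      split_ifs at h ⊢ with h1
      · rcases hg : PySem.List.pyGet? eics 0 with _ | c
        · simp [hg] at h
        · simp only [hg] at h ⊢
          exact ih g' c s (by omega) h
      · exact h

-- findSplit results agree across fuels
theorem findSplit_unique (eic : PySem.Dict Int (List Int)) {f g : Nat} {k a b : Int}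
    (ha : findSplit f eic k = some a) (hb : findSplit g eic k = some b) : a = b := by
  have ha' := findSplit_mono eic f (max f g) k a (Nat.le_max_left f g) ha
  have hb' := findSplit_mono eic g (max f g) k b (Nat.le_max_right f g) hb
  rw [ha'] at hb'; exact (Option.some_inj.mp hb')

-- a chain that reaches a stop point after n steps makes findSplit succeed with fuel n+1
theorem findSplit_of_stop (d : PySem.Dict Int (List Int)) :
    ∀ (n : Nat) (x : Int), isStop d ((nextNode d)^[n] x) = true →
    ∃ s, findSplit (n + 1) d x = some s := by
  intro n
  induction n with
  | zero =>
    intro x h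
    rw [Function.iterate_zero_apply] at h
    unfold isStop at h
    rcases he : d.get? x with _ | l
    · rw [he] at h; exact absurd h (by simp)
    · rw [he] at h
      have hl : l.length ≠ 1 := by simpa using h
      exact ⟨x, by rw [findSplit.eq_def, he]; dsimp only; rw [if_neg hl]⟩
  | succ n ih =>
    intro x h
    rw [Function.iterate_succ_apply] at h
    rcases he : d.get? x with _ | l
    · -- non-key: x is a fixed point of nextNode, so the chain never stops — contradiction
      have hfix : nextNode d x = x := by unfold nextNode; rw [he]
      rw [hfix, Function.iterate_fixed hfix] at h
      unfold isStop at h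
      rw [he] at h
      exact absurd h (by simp)
    · by_cases hl : l.length = 1
      · obtain ⟨a, rfl⟩ := List.length_eq_one_iff.mp hl
        have hnext : nextNode d x = a := by unfold nextNode; rw [he]; simp
        rw [hnext] at h
        obtain ⟨s, hs⟩ := ih a h
        refine ⟨s, ?_⟩
        rw [findSplit.eq_def, he]
        dsimp only
        rw [if_pos hl]
        have : PySem.List.pyGet? [a] 0 = some a := by simp [PySem.List.pyGet?, PySem.List.pyIdx?]
        rw [this]
        exact hs
      · exact ⟨x, by rw [findSplit.eq_def, he]; dsimp only; rw [if_neg hl]⟩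

-- under Pre_, findSplit succeeds with fuel len+1 from every relevant member of iso_list
theorem findSplit_total (iso_dict : List (Int × List Int)) (iso_list : List Int)
    (eic_list : List (List Int)) (hpre : Pre_calc_leaf iso_dict iso_list eic_list) :
    ∀ x ∈ iso_list, x ∈ iso_dict.map Prod.fst → ∃ s,
      findSplit (iso_list.length + 1) (PySem.Dict.ofList (iso_list.zip eic_list)) x = some s := by
  intro x hx hxd
  obtain ⟨n, hn, hstop⟩ := hpre x hx hxd
  obtain ⟨s, hs⟩ := findSplit_of_stop _ n x hstop
  exact ⟨s, findSplit_mono _ (n + 1) (iso_list.length + 1) x s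
    (by have := List.mem_range.mp hn; omega) hs⟩

-- flushing a path into the cache: lookup
theorem get?_assign (s : Int) :
    ∀ (path : List Int) (cache : PySem.Dict Int Int) (k : Int),
    (path.foldl (fun c p => c.insert p s) cache).get? k
      = if k ∈ path then some s else cache.get? k := by
  intro path
  induction path with
  | nil => intro cache k; simp
  | cons p rest ih =>
    intro cache k
    simp only [List.foldl_cons, ih, List.mem_cons]
    by_cases hk : k ∈ rest
    · simp [hk]
    · by_cases hkp : k = p
      · simp [hkp, PySem.Dict.get?_insert_self]
      · simp [hk, hkp, PySem.Dict.get?_insert_of_ne _ _ hkp]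

-- the memoized walk returns exactly findSplit's answer and keeps the cache correct
theorem splitWalk_eq_findSplit (eic : PySem.Dict Int (List Int)) :
    ∀ (f : Nat) (cache : PySem.Dict Int Int) (path : List Int) (cur s : Int),
    findSplit f eic cur = some s →
    (∀ k t, cache.get? k = some t → ∃ g, findSplit g eic k = some t) →
    (∀ p ∈ path, ∀ t g, findSplit g eic cur = some t → ∃ g', findSplit g' eic p = some t) →
    ∃ cache', splitWalk f eic cache path cur = some (s, cache') ∧
      (∀ k t, cache'.get? k = some t → ∃ g, findSplit g eic k = some t) := by
  intro f
  induction f with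
  | zero => intro cache path cur s h _ _; simp [findSplit] at h
  | succ f ih =>
    intro cache path cur s h hinv hpath
    have h0 := h
    rcases he : eic.get? cur with _ | eics
    · rw [findSplit.eq_def, he] at h; exact absurd h (by simp)
    · rw [findSplit.eq_def, he] at h
      dsimp only at h
      rcases hcache : cache.get? cur with _ | s'
      · -- cache miss
        split_ifs at h with h1
        · rcases hg : PySem.List.pyGet? eics 0 with _ | c
          · simp [hg] at h
          · simp only [hg] at h
            have hpath' : ∀ p ∈ path ++ [cur], ∀ t g, findSplit g eic c = some t →
                ∃ g', findSplit g' eic p = some t := by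
              intro p hp t g hgt
              have hcur : findSplit (g+1) eic cur = some t := by
                rw [findSplit.eq_def, he]; dsimp only; rw [if_pos h1, hg]; exact hgt
              rcases List.mem_append.mp hp with hp | hp
              · exact hpath p hp t (g+1) hcur
              · simp at hp; subst hp; exact ⟨g+1, hcur⟩
            obtain ⟨cache', hw, hinv'⟩ := ih cache (path ++ [cur]) c s h hinv hpath'
            refine ⟨cache', ?_, hinv'⟩
            rw [splitWalk, hcache, he]
            dsimp only
            rw [if_pos h1, hg]
            exact hw
        · -- multiple/zero children: split = cur
          obtain rfl := Option.some_inj.mp h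
          have hrel : findSplit 1 eic cur = some cur := by
            rw [findSplit.eq_def, he]; dsimp only; rw [if_neg h1]
          refine ⟨path.foldl (fun c p => c.insert p cur) (cache.insert cur cur), ?_, ?_⟩
          · rw [splitWalk, hcache, he]
            dsimp only
            rw [if_neg h1]
          · intro k t hk
            rw [get?_assign] at hk
            split_ifs at hk with hkp
            · obtain rfl := Option.some_inj.mp hk
              exact hpath k hkp cur 1 hrel
            · rcases hkc : (cache.insert cur cur).get? k with _ | t'
              · rw [hkc] at hk; exact absurd hk (by simp)
              · rw [hkc] at hk; obtain rfl := Option.some_inj.mp hk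
                by_cases hkcur : k = cur
                · subst hkcur
                  rw [PySem.Dict.get?_insert_self] at hkc
                  obtain rfl := Option.some_inj.mp hkc
                  exact ⟨1, hrel⟩
                · rw [PySem.Dict.get?_insert_of_ne _ _ hkcur] at hkc
                  exact hinv k t' hkc
      · -- cache hit
        have hrel := hinv cur s' hcache
        obtain ⟨g, hgs⟩ := hrel
        have : s' = s := findSplit_unique eic hgs h0
        subst this
        refine ⟨path.foldl (fun c p => c.insert p s') cache, ?_, ?_⟩
        · rw [splitWalk, hcache]
        · intro k t hk
          rw [get?_assign] at hk
          split_ifs at hk with hkp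
          · obtain rfl := Option.some_inj.mp hk
            exact hpath k hkp s' g hgs
          · exact hinv k t hk

-- phase 1: B's fold computes A's fsd and a correct cache
theorem phase1 (eic isoD : PySem.Dict Int (List Int)) (F : Nat) :
    ∀ (L : List Int) (cache : PySem.Dict Int Int) (fsd : PySem.Dict Int (List Int)),
    (∀ x ∈ L, isoD.contains x = true → ∃ s, findSplit F eic x = some s) →
    (∀ k t, cache.get? k = some t → ∃ g, findSplit g eic k = some t) →
    (L.foldl (fun st iso =>
        if isoD.contains iso then
          match splitWalk F eic st.1 [] iso with
          | some sc =>
            (sc.2, if st.2.contains sc.1 then st.2.modify sc.1 [] (· ++ [iso])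
                   else st.2.insert sc.1 [sc.1])
          | none => st
        else st) (cache, fsd)).2
      = L.foldl (fun fsd iso =>
          if isoD.contains iso then
            match findSplit F eic iso with
            | some split =>
              if fsd.contains split then fsd.modify split [] (· ++ [iso])
              else fsd.insert split [split]
            | none => fsd
          else fsd) fsd := by
  intro L
  induction L with
  | nil => intro cache fsd _ _; rfl
  | cons x rest ih =>
    intro cache fsd htot hinv
    simp only [List.foldl_cons]
    by_cases hco : isoD.contains x = true
    · obtain ⟨s, hs⟩ := htot x List.mem_cons_self hco
      obtain ⟨cache', hw, hinv'⟩ := splitWalk_eq_findSplit eic F cache [] x s hs hinv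
        (by intro p hp; simp at hp)
      simp only [hco, if_true, hw, hs]
      exact ih cache' _ (fun y hy hyc => htot y (List.mem_cons_of_mem x hy) hyc) hinv'
    · simp only [hco, Bool.false_eq_true, if_false]
      exact ih cache fsd (fun y hy hyc => htot y (List.mem_cons_of_mem x hy) hyc) hinv

-- fsd's keys stay distinct
theorem fsd_keys_nodup (eic isoD : PySem.Dict Int (List Int)) (F : Nat) :
    ∀ (L : List Int) (fsd : PySem.Dict Int (List Int)), fsd.keys.Nodup →
    (L.foldl (fun fsd iso =>
        if isoD.contains iso then
          match findSplit F eic iso with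
          | some split =>
            if fsd.contains split then fsd.modify split [] (· ++ [iso])
            else fsd.insert split [split]
          | none => fsd
        else fsd) fsd).keys.Nodup := by
  intro L
  induction L with
  | nil => intro fsd h; exact h
  | cons x rest ih =>
    intro fsd h
    simp only [List.foldl_cons]
    apply ih
    by_cases hco : isoD.contains x = true
    · simp only [hco, if_true]
      rcases findSplit F eic x with _ | split
      · exact h
      · dsimp only
        split_ifs with hc
        · simpa [PySem.Dict.modify] using PySem.Dict.nodup_keys_insert _ _ _ h
        · exact PySem.Dict.nodup_keys_insert _ _ _ h
    · simpa [hco] using h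

-- A's inner `+=` loop equals one filtered concatenation
theorem inner_append (isoD : PySem.Dict Int (List Int)) (k : Int) :
    ∀ (ms : List Int) (leaf : PySem.Dict Int (List Int)) (acc : List Int),
    ms.foldl (fun leaf subiso =>
        if isoD.contains subiso then leaf.modify k [] (· ++ isoD.getD subiso [])
        else leaf) (leaf.insert k acc)
      = leaf.insert k (acc ++ (ms.filter (fun m => isoD.contains m)).flatMap (fun m => isoD.getD m [])) := by
  intro ms
  induction ms with
  | nil => intro leaf acc; simp
  | cons m rest ih =>
    intro leaf acc
    simp only [List.foldl_cons, List.filter_cons]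
    by_cases hco : isoD.contains m = true
    · have hmod : (leaf.insert k acc).modify k [] (· ++ isoD.getD m [])
          = leaf.insert k (acc ++ isoD.getD m []) := by
        simp [PySem.Dict.modify, PySem.Dict.getD_insert_self, PySem.Dict.insert_insert_self]
      simp only [hco, if_true, hmod, ih, List.flatMap_cons, List.append_assoc]
    · simp only [hco, ih, Bool.false_eq_true, if_false]

theorem phase2_aux (eic isoD fsd : PySem.Dict Int (List Int)) :
    ∀ (L : List (Int × List Int)) (leaf : PySem.Dict Int (List Int)),
    (∀ p ∈ L, fsd.getD p.1 [] = p.2) →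
    L.foldl (fun leaf p =>
        match eic.get? p.1 with
        | some l =>
          if l.length = 0 then
            (fsd.getD p.1 []).foldl (fun leaf subiso =>
              if isoD.contains subiso then leaf.modify p.1 [] (· ++ isoD.getD subiso [])
              else leaf) (leaf.insert p.1 [])
          else leaf
        | none => leaf) leaf
      = L.foldl (fun leaf p =>
          match eic.get? p.1 with
          | some l =>
            if l.length = 0 then
              leaf.insert p.1 ((p.2.filter (fun m => isoD.contains m)).flatMap (fun m => isoD.getD m []))
            else leaf
          | none => leaf) leaf := by
  intro L
  induction L with
  | nil => intro leaf _; rfl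
  | cons p rest ih =>
    intro leaf hget
    simp only [List.foldl_cons]
    have hp : fsd.getD p.1 [] = p.2 := hget p List.mem_cons_self
    have hrest : ∀ q ∈ rest, fsd.getD q.1 [] = q.2 :=
      fun q hq => hget q (List.mem_cons_of_mem p hq)
    rcases he : eic.get? p.1 with _ | l
    · exact ih _ hrest
    · dsimp only
      split_ifs with h0
      · rw [hp, inner_append]
        simp only [List.nil_append]
        exact ih _ hrest
      · exact ih _ hrest

-- phase 2: A's keys-fold equals B's items-fold on the same fsd
theorem phase2 (eic isoD fsd : PySem.Dict Int (List Int))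
    (hnd : fsd.keys.Nodup) :
    fsd.keys.foldl (fun leaf split =>
        match eic.get? split with
        | some l =>
          if l.length = 0 then
            (fsd.getD split []).foldl (fun leaf subiso =>
              if isoD.contains subiso then leaf.modify split [] (· ++ isoD.getD subiso [])
              else leaf) (leaf.insert split [])
          else leaf
        | none => leaf) (PySem.Dict.empty : PySem.Dict Int (List Int))
      = fsd.items.foldl (fun leaf p =>
          match eic.get? p.1 with
          | some l =>
            if l.length = 0 then
              leaf.insert p.1 ((p.2.filter (fun m => isoD.contains m)).flatMap (fun m => isoD.getD m []))
            else leaf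
          | none => leaf) (PySem.Dict.empty : PySem.Dict Int (List Int)) := by
  have hkeys : fsd.keys = fsd.items.map Prod.fst := rfl
  rw [hkeys, List.foldl_map]
  exact phase2_aux eic isoD fsd fsd.items _
    (fun p hp => PySem.Dict.getD_of_mem_items _ (by simpa using hp) hnd [])

-- ===== VERDICT (by name: the statement is the Claim_ definition above) =====
theorem calc_leaf_spec : Claim_equal_calc_leaf := by
  intro iso_dict iso_list eic_list _ hpre
  unfold Spec_calc_leaf calc_leaf calc_leaf_alt
  dsimp only
  have hinv0 : ∀ k t, (PySem.Dict.empty : PySem.Dict Int Int).get? k = some t →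
      ∃ g, findSplit g (PySem.Dict.ofList (iso_list.zip eic_list)) k = some t := by
    intro k t hk
    rw [PySem.Dict.get?_empty] at hk
    cases hk
  rw [phase1 (PySem.Dict.ofList (iso_list.zip eic_list)) (PySem.Dict.mk iso_dict)
      (iso_list.length + 1) iso_list PySem.Dict.empty PySem.Dict.empty
      (fun x hx hc => findSplit_total iso_dict iso_list eic_list hpre x hx
        (by simpa [PySem.Dict.contains, List.any_eq_true, List.mem_map] using hc)) hinv0]
  rw [phase2 (PySem.Dict.ofList (iso_list.zip eic_list)) (PySem.Dict.mk iso_dict) _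
      (fsd_keys_nodup _ _ _ iso_list PySem.Dict.empty PySem.Dict.nodup_keys_empty)]
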